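-- pv_equiv track=rewrite | github.com/nhamby/un-milex-database | scraper.py | _match_subcategory
-- ===== SOURCE A (Python) =====
-- from typing import Dict, Any, Optional, List
--
-- def _match_subcategory(
--     text: str, known_subcategories: List[str]
-- ) -> Optional[str]:
--     """Match extracted text to a known expenditure subcategory.
--
--     Args:
--         text: Extracted text from table
--         known_subcategories: List of standardized subcategory names
--
--     Returns:
--         Matched subcategory name or None
--     """
--     text_lower = text.lower().strip()
--
--     # Direct matching
--     for subcategory in known_subcategories:
--         if subcategory.lower() in text_lower or text_lower in subcategory.lower():
--             return subcategory
--
--     # Special case: "Totals" should match "5. Total (1+2+3+4)"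
--     if text_lower == "totals" or text_lower == "total":
--         for subcategory in known_subcategories:
--             if "5. total" in subcategory.lower():
--                 return subcategory
--
--     # Check if text matches the pattern of our subcategories
--     # Many subcategories start with numbers like "1.", "1.1", etc.
--     for subcategory in known_subcategories:
--         # Extract the number pattern at start
--         if subcategory[0].isdigit():
--             num_part = subcategory.split()[0]  # Get "1." or "1.1" etc.
--             if text_lower.startswith(num_part.lower()):
--                 return subcategory
--
--     return None
-- ===== SOURCE B (Python) =====
-- from typing import List, Optional
--
--
-- def _match_subcategory(
--     text: str, known_subcategories: List[str]
-- ) -> Optional[str]: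
--     """Single pass keeping the first hit for each of the three match kinds."""
--     text_lower = text.lower().strip()
--     is_totals = text_lower in ("totals", "total")
--
--     direct: Optional[str] = None
--     totals_match: Optional[str] = None
--     number: Optional[str] = None
--
--     for subcategory in known_subcategories:
--         sub_lower = subcategory.lower()
--         if direct is None and (sub_lower in text_lower or text_lower in sub_lower):
--             direct = subcategory
--         if totals_match is None and is_totals and "5. total" in sub_lower:
--             totals_match = subcategory
--         if (
--             number is None
--             and subcategory
--             and subcategory[0].isdigit()
--             and text_lower.startswith(subcategory.split()[0].lower())
--         ):
--             number = subcategory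
--
--     if direct is not None:
--         return direct
--     if totals_match is not None:
--         return totals_match
--     return number
-- ===== Notes on version B (the rewrite author's own statement) =====
-- stated objective: alternative
-- what changed: Replaced A's three sequential passes over the list by one single pass maintaining three first-hit Optional slots (direct, totals, number-prefix) combined by priority after the loop.
import Mathlib
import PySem

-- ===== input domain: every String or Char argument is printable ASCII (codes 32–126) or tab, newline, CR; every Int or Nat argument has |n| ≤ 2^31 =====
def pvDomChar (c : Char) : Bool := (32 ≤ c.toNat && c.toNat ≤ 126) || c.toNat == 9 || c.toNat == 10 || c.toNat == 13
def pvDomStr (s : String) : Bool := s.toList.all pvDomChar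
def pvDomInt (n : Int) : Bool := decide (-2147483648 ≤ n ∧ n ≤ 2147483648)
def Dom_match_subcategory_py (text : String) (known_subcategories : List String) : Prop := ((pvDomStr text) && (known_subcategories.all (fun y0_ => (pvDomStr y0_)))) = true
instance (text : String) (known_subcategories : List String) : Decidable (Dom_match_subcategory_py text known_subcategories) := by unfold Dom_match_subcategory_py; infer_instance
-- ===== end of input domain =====

-- B replaces A's three sequential passes over the list by one single pass keeping three
-- first-hit Optional slots; same cost, different decomposition (objective: alternative).

-- The three per-element tests, shared by both ports (identical expressions in Source A and Source B):
-- `subcategory.lower() in text_lower or text_lower in subcategory.lower()`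
def pvDirectP (tl : String) (sub : String) : Bool :=
  PySem.Str.isIn (PySem.Str.lower sub) tl || PySem.Str.isIn tl (PySem.Str.lower sub)
-- `"5. total" in subcategory.lower()`
def pvTotalsP (sub : String) : Bool := PySem.Str.isIn "5. total" (PySem.Str.lower sub)
-- `subcategory[0].isdigit() and text_lower.startswith(subcategory.split()[0].lower())`.
-- On an empty subcategory Python's A would raise IndexError at `subcategory[0]`, but that
-- point is unreachable in A ("" always matches the direct pass first), so `false` (= Source B's
-- explicit `subcategory and` guard) is exact on every reachable input; `split()[0]` is
-- `headD ""`, exact because the word list is nonempty when the subcategory starts with a digit.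
def pvNumP (tl : String) (sub : String) : Bool :=
  match sub.toList with
  | [] => false
  | c :: _ =>
    PySem.Chars.isdigit c &&
      PySem.Str.startswith tl (PySem.Str.lower ((PySem.Str.split₀ sub).headD ""))

-- ===== PORT A =====
-- A's first loop: direct matching, return on first hit
def pvLoopDirect (tl : String) : List String → Option String
  | [] => none
  | sub :: rest => if pvDirectP tl sub then some sub else pvLoopDirect tl rest

-- A's second loop: the "5. total" special case
def pvLoopTotals : List String → Option String
  | [] => none
  | sub :: rest => if pvTotalsP sub then some sub else pvLoopTotals rest

-- A's third loop: number-prefix matching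
def pvLoopNum (tl : String) : List String → Option String
  | [] => none
  | sub :: rest => if pvNumP tl sub then some sub else pvLoopNum tl rest

def match_subcategory_py (text : String) (known_subcategories : List String) : Option String :=
  let text_lower := PySem.Str.strip (PySem.Str.lower text)
  match pvLoopDirect text_lower known_subcategories with
  | some s => some s
  | none =>
    match (if text_lower == "totals" || text_lower == "total"
           then pvLoopTotals known_subcategories else none) with
    | some s => some s
    | none => pvLoopNum text_lower known_subcategories

-- ===== PORT B =====
-- one step of Source B's single pass: set each still-empty slot on its first hit
def pvStep (tl : String) (isTotals : Bool)
    (st : Option String × Option String × Option String) (sub : String) :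
    Option String × Option String × Option String :=
  (if st.1.isNone && pvDirectP tl sub then some sub else st.1,
   if st.2.1.isNone && (isTotals && pvTotalsP sub) then some sub else st.2.1,
   if st.2.2.isNone && pvNumP tl sub then some sub else st.2.2)

def match_subcategory_py_alt (text : String) (known_subcategories : List String) : Option String :=
  let text_lower := PySem.Str.strip (PySem.Str.lower text)
  let isTotals := text_lower == "totals" || text_lower == "total"
  let st := known_subcategories.foldl (pvStep text_lower isTotals) (none, none, none)
  match st.1 with
  | some s => some s
  | none =>
    match st.2.1 with
    | some s => some s
    | none => st.2.2

-- ===== PRECONDITION & SPEC =====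
def Spec_match_subcategory_py (text : String) (known_subcategories : List String) (out : Option String) : Prop := out = match_subcategory_py_alt text known_subcategories
instance (text : String) (known_subcategories : List String) (out : Option String) : Decidable (Spec_match_subcategory_py text known_subcategories out) := by unfold Spec_match_subcategory_py; infer_instance

-- ===== CLAIM (what is proved, stated in full; the proofs are below) =====
def Claim_equal_match_subcategory_py : Prop := ∀ (text : String) (known_subcategories : List String), Dom_match_subcategory_py text known_subcategories → Spec_match_subcategory_py text known_subcategories (match_subcategory_py text known_subcategories)

-- ===== LEMMAS AND PROOFS =====

theorem pvLoopDirect_eq (tl : String) (ks : List String) :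
    pvLoopDirect tl ks = ks.find? (pvDirectP tl) := by
  induction ks with
  | nil => rfl
  | cons sub rest ih =>
    rw [List.find?_cons]
    cases h : pvDirectP tl sub <;> simp [pvLoopDirect, h, ih]

theorem pvLoopTotals_eq (ks : List String) :
    pvLoopTotals ks = ks.find? pvTotalsP := by
  induction ks with
  | nil => rfl
  | cons sub rest ih =>
    rw [List.find?_cons]
    cases h : pvTotalsP sub <;> simp [pvLoopTotals, h, ih]

theorem pvLoopNum_eq (tl : String) (ks : List String) :
    pvLoopNum tl ks = ks.find? (pvNumP tl) := by
  induction ks with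
  | nil => rfl
  | cons sub rest ih =>
    rw [List.find?_cons]
    cases h : pvNumP tl sub <;> simp [pvLoopNum, h, ih]

theorem pvFoldl_step (tl : String) (b : Bool) (ks : List String)
    (d t n : Option String) :
    ks.foldl (pvStep tl b) (d, t, n) =
      ((d.orElse fun _ => ks.find? (pvDirectP tl)),
       (t.orElse fun _ => if b then ks.find? pvTotalsP else none),
       (n.orElse fun _ => ks.find? (pvNumP tl))) := by
  induction ks generalizing d t n with
  | nil => cases d <;> cases t <;> cases n <;> cases b <;> rfl
  | cons sub rest ih =>
    rw [List.foldl_cons, pvStep, ih, List.find?_cons, List.find?_cons, List.find?_cons]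
    cases d <;> cases t <;> cases n <;> cases b <;>
      cases h1 : pvDirectP tl sub <;> cases h2 : pvTotalsP sub <;>
      cases h3 : pvNumP tl sub <;> rfl

-- ===== VERDICT (by name: the statement is the Claim_ definition above) =====
theorem match_subcategory_py_spec : Claim_equal_match_subcategory_py := by
  intro text ks _
  unfold Spec_match_subcategory_py
  simp only [match_subcategory_py, match_subcategory_py_alt, pvFoldl_step,
    pvLoopDirect_eq, pvLoopTotals_eq, pvLoopNum_eq]
  simp only [Option.orElse]
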